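-- pv_equiv track=rewrite | github.com/thekoushikdurgas/docsai | scripts/inject_arch_tasks.py | _section_span
-- ===== SOURCE A (Python) =====
-- def _section_span(lines: list[str], heading: str) -> tuple[int, int] | None:
--     """Return [start, end) line indices for content under `heading` until next ### or ##."""
--     start = None
--     for i, line in enumerate(lines):
--         if line.strip() == heading.strip():
--             start = i + 1
--             break
--     if start is None:
--         return None
--     end = len(lines)
--     for j in range(start, len(lines)):
--         s = lines[j]
--         if s.startswith("### ") or (s.startswith("## ") and not s.startswith("###")):
--             end = j
--             break
--     return (start, end)
-- ===== SOURCE B (Python) =====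
-- def _section_span(lines: list[str], heading: str) -> tuple[int, int] | None:
--     """Precompute all section-boundary indices once, locate the heading by index
--     lookup on a stripped copy, then binary-search the sorted boundary list for
--     the first boundary at or after start."""
--     target = heading.strip()
--     stripped = [l.strip() for l in lines]
--     if target not in stripped:
--         return None
--     start = stripped.index(target) + 1
--     bounds = [i for i, s in enumerate(lines)
--               if s.startswith("### ") or (s.startswith("## ") and not s.startswith("###"))]
--     # binary search: first index lo with bounds[lo] >= start
--     lo, hi = 0, len(bounds)
--     while lo < hi:
--         mid = (lo + hi) // 2
--         if bounds[mid] < start: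
--             lo = mid + 1
--         else:
--             hi = mid
--     end = bounds[lo] if lo < len(bounds) else len(lines)
--     return (start, end)
-- ===== Notes on version B (the rewrite author's own statement) =====
-- stated objective: alternative
-- what changed: Instead of A's sequential scan-then-scan with early breaks, B precomputes the full list of boundary line indices, finds the heading by an index lookup on a stripped copy, and binary-searches the sorted boundary list for the first boundary at or after start.
import Mathlib
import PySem

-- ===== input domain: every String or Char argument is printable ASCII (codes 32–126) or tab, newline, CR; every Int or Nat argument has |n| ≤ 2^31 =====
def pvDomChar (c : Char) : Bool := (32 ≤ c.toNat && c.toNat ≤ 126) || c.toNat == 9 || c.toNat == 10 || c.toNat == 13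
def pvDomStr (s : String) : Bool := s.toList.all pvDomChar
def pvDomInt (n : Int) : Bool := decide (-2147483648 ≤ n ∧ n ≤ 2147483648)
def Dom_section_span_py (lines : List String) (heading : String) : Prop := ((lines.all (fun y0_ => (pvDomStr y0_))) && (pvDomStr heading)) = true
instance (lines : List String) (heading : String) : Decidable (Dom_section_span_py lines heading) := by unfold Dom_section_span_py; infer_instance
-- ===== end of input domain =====

-- B replaces A's scan-then-scan-with-break by: precompute all boundary indices, index-lookup
-- the heading on a stripped copy, binary-search the sorted boundary list; same result.

-- ===== PORT A =====
-- first loop of A: find i with lines[i].strip() == heading.strip(), return i+1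
def findA (t : String) : List String → Int → Option Int
  | [], _ => none
  | l :: ls, i => if PySem.Str.strip l = t then some (i + 1) else findA t ls (i + 1)

-- second loop of A: for j in range(start, len(lines)); lines[j] is always in range,
-- so pyGetD with default "" is exact here
def loopA (lines : List String) : List Int → Option Int
  | [] => none
  | j :: js =>
    let s := PySem.List.pyGetD lines j ""
    if PySem.Str.startswith s "### " || (PySem.Str.startswith s "## " && !PySem.Str.startswith s "###") then some j
    else loopA lines js

def section_span_py (lines : List String) (heading : String) : Option (Int × Int) :=
  match findA (PySem.Str.strip heading) lines 0 with
  | none => none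
  | some start =>
      some (start, (loopA lines (PySem.List.pyRange start ((lines.length : Nat) : Int) 1)).getD ((lines.length : Nat) : Int))

-- ===== PORT B =====
def boundaryB (line : String) : Bool :=
  PySem.Str.startswith line "### " || (PySem.Str.startswith line "## " && !PySem.Str.startswith line "###")

-- Source B's comprehension '[i for i, s in enumerate(lines) if <boundary>]'
def boundsB : List String → Int → List Int
  | [], _ => []
  | l :: ls, i => if boundaryB l then i :: boundsB ls (i + 1) else boundsB ls (i + 1)

-- Source B's hand-written while loop 'while lo < hi: mid = (lo+hi)//2 …', fuel = initial hi - lo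
def bsearchB (bounds : List Int) (start : Int) : Nat → Int → Int → Int
  | 0, lo, _ => lo
  | fuel + 1, lo, hi =>
    if lo < hi then
      let mid := PySem.Int.floordiv (lo + hi) 2
      if PySem.List.pyGetD bounds mid 0 < start then bsearchB bounds start fuel (mid + 1) hi
      else bsearchB bounds start fuel lo mid
    else lo

def section_span_py_alt (lines : List String) (heading : String) : Option (Int × Int) :=
  let target := PySem.Str.strip heading
  let stripped := lines.map PySem.Str.strip
  if stripped.contains target then
    match PySem.List.index? stripped target with
    | none => none  -- unreachable: target ∈ stripped
    | some k =>
      let start : Int := (k : Int) + 1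
      let bounds := boundsB lines 0
      let lo := bsearchB bounds start bounds.length 0 ((bounds.length : Nat) : Int)
      let e : Int := if lo < ((bounds.length : Nat) : Int) then PySem.List.pyGetD bounds lo 0
                     else ((lines.length : Nat) : Int)
      some (start, e)
  else none

-- ===== PRECONDITION & SPEC =====
def Spec_section_span_py (lines : List String) (heading : String) (out : Option (Int × Int)) : Prop := out = section_span_py_alt lines heading
instance (lines : List String) (heading : String) (out : Option (Int × Int)) : Decidable (Spec_section_span_py lines heading out) := by unfold Spec_section_span_py; infer_instance

-- ===== CLAIM (what is proved, stated in full; the proofs are below) =====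
def Claim_equal_section_span_py : Prop := ∀ (lines : List String) (heading : String), Dom_section_span_py lines heading → Spec_section_span_py lines heading (section_span_py lines heading)

-- ===== LEMMAS AND PROOFS =====
-- reference scan: first boundary index in a suffix, counting from i
def scanSuf : List String → Int → Option Int
  | [], _ => none
  | l :: ls, i => if boundaryB l then some i else scanSuf ls (i + 1)

theorem loopA_suffix : ∀ (suf pre : List String),
    loopA (pre ++ suf) (PySem.List.pyRange (pre.length : Int) (((pre ++ suf).length : Nat) : Int) 1)
      = scanSuf suf (pre.length : Int) := by
  intro suf
  induction suf with
  | nil =>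
      intro pre
      rw [PySem.List.pyRange_one_eq_nil (by simp)]
      rfl
  | cons l ls ih =>
      intro pre
      rw [PySem.List.pyRange_one_cons (by simp only [List.length_append, List.length_cons]; push_cast; omega)]
      have hget : PySem.List.pyGetD (pre ++ l :: ls) (pre.length : Int) "" = l := by
        simp [PySem.List.pyGetD, PySem.List.pyGet?, PySem.List.pyIdx?]
      simp only [loopA, hget, scanSuf]
      split_ifs with h1 h2 h3
      · rfl
      · exact absurd h1 h2
      · exact absurd h3 h1
      ·
        have h1 : pre ++ l :: ls = (pre ++ [l]) ++ ls := by simp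
        have h2 : ((pre.length : Int) + 1) = (((pre ++ [l]).length : Nat) : Int) := by simp
        rw [h1, h2]
        exact ih (pre ++ [l])

-- A's first loop is the index lookup on the stripped copy
theorem findA_eq_index? : ∀ (xs : List String) (i : Int) (t : String),
    findA t xs i = (PySem.List.index? (xs.map PySem.Str.strip) t).map (fun k : Nat => i + (k : Int) + 1) := by
  intro xs
  induction xs with
  | nil => intro i t; simp [findA, PySem.List.index?]
  | cons l ls ih =>
      intro i t
      simp only [findA, List.map_cons]
      by_cases hs : PySem.Str.strip l = t
      · rw [hs, PySem.List.index?_cons_self]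
        simp
      · rw [PySem.List.index?_cons_of_ne _ hs, ih (i + 1) t]
        cases PySem.List.index? (ls.map PySem.Str.strip) t with
        | none => simp [hs]
        | some k =>
            simp only [Option.map_some, hs, if_false]
            congr 1
            simp
            omega

-- A's second loop is the head of the boundary-index suffix
theorem scanSuf_eq_head : ∀ (xs : List String) (i : Int),
    scanSuf xs i = (boundsB xs i).head? := by
  intro xs
  induction xs with
  | nil => intro i; rfl
  | cons l ls ih =>
      intro i
      simp only [scanSuf, boundsB]
      by_cases hb : boundaryB l
      · simp [hb]
      · simp only [hb, Bool.false_eq_true, if_false]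
        exact ih (i + 1)

theorem boundsB_append : ∀ (pre suf : List String) (i : Int),
    boundsB (pre ++ suf) i = boundsB pre i ++ boundsB suf (i + pre.length) := by
  intro pre
  induction pre with
  | nil => intro suf i; simp [boundsB]
  | cons l ls ih =>
      intro suf i
      simp only [List.cons_append, boundsB]
      have h : (i + 1) + (ls.length : Int) = i + ((l :: ls).length : Nat) := by
        simp; omega
      by_cases hb : boundaryB l
      · simp only [hb, if_true, ih suf (i + 1), h, List.cons_append]
      · simp only [hb, Bool.false_eq_true, if_false, ih suf (i + 1), h]

theorem boundsB_mem : ∀ (xs : List String) (i j : Int),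
    j ∈ boundsB xs i → i ≤ j ∧ j < i + xs.length := by
  intro xs
  induction xs with
  | nil => intro i j h; simp [boundsB] at h
  | cons l ls ih =>
      intro i j h
      simp only [boundsB] at h
      by_cases hb : boundaryB l
      · simp only [hb, if_true, List.mem_cons] at h
        rcases h with h | h
        · subst h; constructor <;> simp
        · have := ih (i + 1) j h; simp at this ⊢; omega
      · simp only [hb, Bool.false_eq_true, if_false] at h
        have := ih (i + 1) j h; simp at this ⊢; omega

-- binary search on a 'small ++ large' split returns the split point
theorem bsearch_split (bx by_ : List Int) (start : Int)
    (hx : ∀ x ∈ bx, x < start) (hy : ∀ y ∈ by_, start ≤ y) :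
    ∀ (fuel : Nat) (lo hi : Int), 0 ≤ lo → lo ≤ (bx.length : Int) →
      (bx.length : Int) ≤ hi → hi ≤ ((bx ++ by_).length : Int) → (hi - lo).toNat ≤ fuel →
      bsearchB (bx ++ by_) start fuel lo hi = (bx.length : Int) := by
  intro fuel
  induction fuel with
  | zero =>
      intro lo hi h0 h1 h2 h3 hf
      simp only [bsearchB]; omega
  | succ n ih =>
      intro lo hi h0 h1 h2 h3 hf
      simp only [bsearchB]
      by_cases hlt : lo < hi
      · simp only [hlt, if_true]
        have hmid1 : lo ≤ PySem.Int.floordiv (lo + hi) 2 := by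
          rw [PySem.Int.le_floordiv_iff_mul_le (by omega)]; omega
        have hmid2 : PySem.Int.floordiv (lo + hi) 2 < hi := by
          rw [PySem.Int.floordiv_lt_iff_lt_mul (by omega)]; omega
        set mid := PySem.Int.floordiv (lo + hi) 2 with hmiddef
        have hmidlen : mid.toNat < (bx ++ by_).length := by
          simp only [List.length_append] at h3 ⊢; omega
        have hget : PySem.List.pyGetD (bx ++ by_) mid 0 = (bx ++ by_)[mid.toNat] :=
          PySem.List.pyGetD_eq_getElem _ _ (by omega) (by omega)
        by_cases hside : mid.toNat < bx.length
        · have helem : (bx ++ by_)[mid.toNat] = bx[mid.toNat] := List.getElem_append_left hside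
          have hv : (bx ++ by_)[mid.toNat] < start := by
            rw [helem]; exact hx _ (List.getElem_mem _)
          rw [hget]
          simp only [hv, if_true]
          exact ih (mid + 1) hi (by omega) (by omega) h2 h3 (by omega)
        · have hle : bx.length ≤ mid.toNat := by omega
          have helem : (bx ++ by_)[mid.toNat] = by_[mid.toNat - bx.length]'(by
              simp only [List.length_append] at hmidlen; omega) := List.getElem_append_right hle
          have hb' : mid.toNat - bx.length < by_.length := by
            simp only [List.length_append] at hmidlen; omega
          have hv : ¬ (bx ++ by_)[mid.toNat] < start := by
            rw [helem]; exact not_lt.mpr (hy _ (List.getElem_mem hb'))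
          rw [hget]
          simp only [hv, if_false]
          exact ih lo mid h0 h1 (by omega) (by omega) (by omega)
      · simp only [hlt, if_false]; omega

-- ===== VERDICT (by name: the statement is the Claim_ definition above) =====
theorem section_span_py_spec : Claim_equal_section_span_py := by
  intro lines heading _
  unfold Spec_section_span_py section_span_py section_span_py_alt
  rw [findA_eq_index? lines 0 (PySem.Str.strip heading)]
  cases hidx : PySem.List.index? (lines.map PySem.Str.strip) (PySem.Str.strip heading) with
  | none =>
      have hc : (lines.map PySem.Str.strip).contains (PySem.Str.strip heading) = false := by
        rw [List.contains_eq_mem, decide_eq_false_iff_not]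
        exact (PySem.List.index?_eq_none_iff _ _).1 hidx
      simp only [hc, Bool.false_eq_true, if_false, Option.map_none]
  | some k =>
      have hc : (lines.map PySem.Str.strip).contains (PySem.Str.strip heading) = true := by
        rw [List.contains_eq_mem, decide_eq_true_eq]
        have hm : PySem.Str.strip heading ∈ lines.map PySem.Str.strip := by
          rw [← PySem.List.index?_isSome_iff, hidx]; rfl
        simpa using hm
      obtain ⟨hk, _, _⟩ := PySem.List.getElem_of_index?_eq_some hidx
      have hklen : k < lines.length := by simpa using hk
      -- split lines at position k+1
      set pre := lines.take (k + 1) with hpre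
      set suf := lines.drop (k + 1) with hsuf
      have hsplit : lines = pre ++ suf := (List.take_append_drop (k + 1) lines).symm
      have hprelen : pre.length = k + 1 := by
        simp [hpre]; omega
      simp only [hc, if_true, hidx, Option.map_some]
      -- A side
      have hstart : (0 : Int) + (k : Int) + 1 = ((pre.length : Nat) : Int) := by
        rw [hprelen]; push_cast; omega
      conv_lhs => rw [hsplit]
      rw [hstart]
      rw [loopA_suffix suf pre, scanSuf_eq_head]
      -- B side
      have hboundsplit : boundsB lines 0 = boundsB pre 0 ++ boundsB suf ((pre.length : Nat) : Int) := by
        conv_lhs => rw [hsplit]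
        rw [boundsB_append]; norm_num
      rw [hboundsplit]
      set bx := boundsB pre 0 with hbx
      set by_ := boundsB suf ((pre.length : Nat) : Int) with hby
      have hx : ∀ x ∈ bx, x < ((pre.length : Nat) : Int) := by
        intro x hxmem
        have := boundsB_mem pre 0 x hxmem; omega
      have hy : ∀ y ∈ by_, ((pre.length : Nat) : Int) ≤ y := by
        intro y hymem
        exact (boundsB_mem suf _ y hymem).1
      have hstart' : ((k : Int) + 1) = ((pre.length : Nat) : Int) := by rw [hprelen]; push_cast; omega
      rw [hstart']
      rw [bsearch_split bx by_ _ hx hy ((bx ++ by_).length) 0 ((bx ++ by_).length : Int)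
            (by omega) (by simp) (by simp) (by omega) (by omega)]
      have hlines_len : lines.length = pre.length + suf.length := by
        rw [hsplit, List.length_append]
      cases hby_cases : by_ with
      | nil =>
          simp only [List.head?_nil, Option.getD_none]
          rw [if_neg (by simp), ← hsplit]
      | cons b bs =>
          have hgetb : PySem.List.pyGetD (bx ++ b :: bs) ((bx.length : Nat) : Int) 0 = b := by
            simp [PySem.List.pyGetD, PySem.List.pyGet?, PySem.List.pyIdx?]
          simp only [List.head?_cons, Option.getD_some]
          rw [if_pos (by simp), hgetb]
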